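-- pv_equiv track=rewrite | github.com/IngvarKofoed/jake-bot | jake_bot/stream_coordinator.py | _unclosed_code_fence
-- ===== SOURCE A (Python) =====
-- def _unclosed_code_fence(text: str) -> str | None:
--     """If text has an unclosed ``` block, return the fence line (e.g. '```json').
--
--     Returns None if all code blocks are properly closed.
--     """
--     fence = None
--     for line in text.split("\n"):
--         stripped = line.strip()
--         if stripped.startswith("```"):
--             if fence is None:
--                 fence = stripped
--             else:
--                 fence = None
--     return fence
-- ===== SOURCE B (Python) =====
-- def _unclosed_code_fence(text: str) -> str | None:
--     fences = [l.strip() for l in text.split("\n") if l.strip().startswith("```")]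
--     return fences[-1] if len(fences) % 2 == 1 else None
-- ===== Notes on version B (the rewrite author's own statement) =====
-- stated objective: simpler
-- what changed: Replaces the running toggle state with a collect-all-fence-lines comprehension followed by a parity check: return the last fence line if the count is odd, else None.
import Mathlib
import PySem

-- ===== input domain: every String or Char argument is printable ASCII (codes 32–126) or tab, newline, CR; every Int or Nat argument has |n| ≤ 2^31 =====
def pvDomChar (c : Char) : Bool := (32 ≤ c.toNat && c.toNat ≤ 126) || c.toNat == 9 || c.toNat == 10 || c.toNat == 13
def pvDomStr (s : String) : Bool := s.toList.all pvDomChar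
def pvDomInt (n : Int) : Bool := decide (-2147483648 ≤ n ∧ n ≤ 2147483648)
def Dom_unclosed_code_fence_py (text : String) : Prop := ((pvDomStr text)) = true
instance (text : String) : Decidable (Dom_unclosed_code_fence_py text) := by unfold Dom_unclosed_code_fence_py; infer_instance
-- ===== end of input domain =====

-- B replaces A's running toggle state with collect-all-fence-lines then a parity check (objective: simpler).

-- ===== PORT A =====
-- literal port of A: fold the toggle state over the lines
-- (split? never returns none here since the separator "\n" is nonempty; getD [] is unreachable)
def unclosed_code_fence_py (text : String) : Option String :=
  ((PySem.Str.split? text "\n").getD []).foldl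
    (fun fence line =>
      let stripped := PySem.Str.strip line
      if PySem.Str.startswith stripped "```" then
        match fence with
        | none => some stripped
        | some _ => none
      else fence)
    none

-- ===== PORT B =====
-- port of B: collect all stripped fence lines, decide by parity (fences[-1] = pyGet? (-1))
def unclosed_code_fence_py_alt (text : String) : Option String :=
  let fences := (((PySem.Str.split? text "\n").getD []).map PySem.Str.strip).filter
    (fun l => PySem.Str.startswith l "```")
  if fences.length % 2 == 1 then PySem.List.pyGet? fences (-1) else none

-- ===== PRECONDITION & SPEC =====
def Spec_unclosed_code_fence_py (text : String) (out : Option String) : Prop := out = unclosed_code_fence_py_alt text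
instance (text : String) (out : Option String) : Decidable (Spec_unclosed_code_fence_py text out) := by unfold Spec_unclosed_code_fence_py; infer_instance

-- ===== CLAIM (what is proved, stated in full; the proofs are below) =====
def Claim_equal_unclosed_code_fence_py : Prop := ∀ (text : String), Dom_unclosed_code_fence_py text → Spec_unclosed_code_fence_py text (unclosed_code_fence_py text)

-- ===== LEMMAS AND PROOFS =====

-- A's toggle step, restricted to a fence line that is already stripped
def pvTog (s : Option String) (f : String) : Option String :=
  match s with | none => some f | some _ => none

-- xs[-1] is the last element
theorem pyGet?_neg_one (xs : List String) : PySem.List.pyGet? xs (-1) = xs.getLast? := by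
  cases xs with
  | nil => rfl
  | cons h t =>
    simp [PySem.List.pyGet?, PySem.List.pyIdx?, List.getLast?_eq_getElem?]

-- A's fold over all lines equals the toggle fold over the filtered stripped fence lines
theorem foldl_tog_filter (ls : List String) (s : Option String) :
    ls.foldl (fun fence line =>
      let stripped := PySem.Str.strip line
      if PySem.Str.startswith stripped "```" then
        match fence with
        | none => some stripped
        | some _ => none
      else fence) s
    = ((ls.map PySem.Str.strip).filter (fun l => PySem.Str.startswith l "```")).foldl pvTog s := by
  induction ls generalizing s with
  | nil => rfl
  | cons h t ih =>
    simp only [List.foldl, List.map, List.filter]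
    by_cases hc : PySem.Chars.startswith (PySem.Chars.strip h.toList) ['`', '`', '`'] = true
    · cases s with
      | none =>
        simp [hc]
        simpa using ih (some (PySem.Str.strip h))
      | some y =>
        simp [hc, pvTog]
        simpa using ih none
    · simp [hc]
      simpa using ih s

-- the toggle fold from none yields the last fence line iff the fence count is odd
theorem foldl_tog_parity (fs : List String) :
    (fs.foldl pvTog none
      = if fs.length % 2 == 1 then fs.getLast? else none)
    ∧ ∀ x, fs.foldl pvTog (some x)
      = if fs.length % 2 == 0 then some (fs.getLast?.getD x) else none := by
  induction fs with
  | nil => simp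
  | cons f t ih =>
    constructor
    · have h2 := ih.2 f
      simp only [List.foldl, pvTog] at h2 ⊢
      rw [h2]
      by_cases he : t.length % 2 = 0
      · have h1 : (f :: t).length % 2 = 1 := by simp [List.length_cons]; omega
        simp only [he, h1, beq_self_eq_true, if_pos]
        cases t with
        | nil => simp
        | cons a t' =>
          rw [List.getLast?_cons_cons]
          cases hl : (a :: t').getLast? with
          | none => simp [List.getLast?_eq_getElem?] at hl
          | some v => simp
      · have h1 : (f :: t).length % 2 ≠ 1 := by simp [List.length_cons]; omega
        simp [he]
        intro h; omega
    · intro x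
      have h1 := ih.1
      simp only [List.foldl, pvTog] at h1 ⊢
      rw [h1]
      by_cases ho : t.length % 2 = 1
      · have h0 : (f :: t).length % 2 = 0 := by simp [List.length_cons]; omega
        have hne : t ≠ [] := by intro hn; subst hn; simp at ho
        simp only [ho, h0, beq_self_eq_true, if_pos]
        cases t with
        | nil => exact absurd rfl hne
        | cons a t' =>
          rw [List.getLast?_cons_cons]
          cases hl : (a :: t').getLast? with
          | none => simp [List.getLast?_eq_getElem?] at hl
          | some v => simp
      · have h0 : (f :: t).length % 2 ≠ 0 := by simp [List.length_cons]; omega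
        simp [ho]
        omega

-- ===== VERDICT (by name: the statement is the Claim_ definition above) =====
theorem unclosed_code_fence_py_spec : Claim_equal_unclosed_code_fence_py := by
  intro text _
  unfold Spec_unclosed_code_fence_py unclosed_code_fence_py unclosed_code_fence_py_alt
  simp only [foldl_tog_filter, pyGet?_neg_one]
  exact (foldl_tog_parity _).1
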